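-- pv_equiv track=rewrite | github.com/Element23VM/nhlgoaldeconstruct | teamsfun.py | getPlayerGoalsAtHome
-- ===== SOURCE A (Python) =====
-- def oneOff(reffy, newy):
--
--     for x in reffy:
--         if reffy[x] == max(reffy.values()):
--             t = reffy[x]
--             for y in reffy:
--                 if t == reffy[y]:
--                     newy.setdefault(y, t)
--                     return newy
--
-- def sortMyListPlease(oldlist):
--     ref = {}
--
--     new = {}
--
--     todelete = {}
--
--     #old list must be duplicated, not referenced again
--     for x in oldlist:
--         ref.setdefault(x, oldlist[x])
--
--     while len(new) < len(oldlist):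
--         new = oneOff(ref, new)
--         for x in new:
--             todelete.setdefault(x)
--         for x in todelete:
--             if x in ref:
--                 del ref[x]
--
--     return new
--
-- def getPlayerGoalsAtHome(system):
--
--     pdb = {}
--     scoredQ = [
--         "hg1", "hg2", "hg3", "hg4", "hg5", "hg6", "hg7", "hg8", "hg9",
--         "hg10", "hg11", "hg12"
--         ]
--     notme = ""
--
--     for x in system: ##finds the packs
--         pack = system[x]
--         for y in pack: ##fishing now throough games
--             game = pack[y]
--             for z in game: ##each game
--
--                 for q in scoredQ:
--
--                     if z == q:
--                         if game[z] != notme: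
--                             if game[z] not in pdb.keys():
--                                 pdb.setdefault(game[z], 1)
--                             elif game[z] in pdb.keys():
--                                 pdb[game[z]] += 1
--
--     pdb = sortMyListPlease(pdb)
--
--     return pdb
-- ===== SOURCE B (Python) =====
-- def getPlayerGoalsAtHome(system):
--     scored = {"hg1", "hg2", "hg3", "hg4", "hg5", "hg6", "hg7", "hg8", "hg9",
--               "hg10", "hg11", "hg12"}
--     pdb = {}
--     for pack in system.values():
--         for game in pack.values():
--             for z, player in game.items():
--                 if z in scored and player != "":
--                     pdb[player] = pdb.get(player, 0) + 1
--     return dict(sorted(pdb.items(), key=lambda kv: kv[1], reverse=True))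
-- ===== Notes on version B (the rewrite author's own statement) =====
-- stated objective: faster
-- what changed: B keeps the nested counting loop but replaces A's oneOff/sortMyListPlease repeated-scan-for-max selection sort (which rescans the dict and recomputes max() for every extracted element) with a single stable comparison sort of the count dict's items, descending by count; Python's stable sort preserves A's first-seen tie order.
import Mathlib
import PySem

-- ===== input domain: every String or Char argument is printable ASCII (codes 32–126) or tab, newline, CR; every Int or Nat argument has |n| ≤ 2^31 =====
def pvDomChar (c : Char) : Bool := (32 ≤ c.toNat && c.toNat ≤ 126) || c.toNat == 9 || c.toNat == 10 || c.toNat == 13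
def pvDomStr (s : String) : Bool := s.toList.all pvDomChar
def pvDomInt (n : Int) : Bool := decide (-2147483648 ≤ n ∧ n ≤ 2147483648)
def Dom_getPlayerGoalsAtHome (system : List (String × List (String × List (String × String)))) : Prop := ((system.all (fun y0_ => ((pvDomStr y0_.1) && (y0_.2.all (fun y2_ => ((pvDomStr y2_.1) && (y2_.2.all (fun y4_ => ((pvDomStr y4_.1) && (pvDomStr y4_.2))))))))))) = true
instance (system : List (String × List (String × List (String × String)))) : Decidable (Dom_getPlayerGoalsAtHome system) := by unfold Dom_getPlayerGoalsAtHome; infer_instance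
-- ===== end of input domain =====

-- B replaces A's quadratic repeated-scan-for-max selection sort (oneOff/sortMyListPlease)
-- by one stable comparison sort of the count dict's items, descending by count.

-- ===== PORT A =====
def pvScoredQ : List String :=
  ["hg1", "hg2", "hg3", "hg4", "hg5", "hg6", "hg7", "hg8", "hg9", "hg10", "hg11", "hg12"]

-- the counting loops of getPlayerGoalsAtHome (pdb[game[z]] += 1 is Dict.modify with the key present by the elif guard)
def pvCountA (system : List (String × List (String × List (String × String)))) :
    PySem.Dict String Int :=
  system.foldl (fun pdb x =>
    x.2.foldl (fun pdb y =>
      y.2.foldl (fun pdb z =>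
        pvScoredQ.foldl (fun pdb q =>
          if z.1 = q then
            if z.2 ≠ "" then
              if pdb.contains z.2 = false then pdb.setdefault z.2 1
              else if pdb.contains z.2 then pdb.modify z.2 0 (· + 1)
              else pdb
            else pdb
          else pdb) pdb) pdb) pdb) PySem.Dict.empty

-- inner 'for y in reffy' of oneOff: first y with t == reffy[y]
def pvOneOffInner (t : Int) (newy : PySem.Dict String Int) :
    List (String × Int) → Option (PySem.Dict String Int)
  | [] => none
  | (y, vy) :: rest =>
    if t = vy then some (newy.setdefault y t) else pvOneOffInner t newy rest

-- outer 'for x in reffy' of oneOff (max(reffy.values()) as PySem.List.max?; the loop body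
-- only runs when reffy is nonempty, where max? is some)
def pvOneOffOuter (reffy newy : PySem.Dict String Int) :
    List (String × Int) → Option (PySem.Dict String Int)
  | [] => none
  | (_, vx) :: rest =>
    if some vx = PySem.List.max? reffy.values (fun v => v) then
      pvOneOffInner vx newy reffy.items
    else pvOneOffOuter reffy newy rest

def pvOneOff (reffy newy : PySem.Dict String Int) : Option (PySem.Dict String Int) :=
  pvOneOffOuter reffy newy reffy.items

-- the while loop of sortMyListPlease; fuel is a totality guard only (the loop adds one key
-- per iteration, so len(oldlist) iterations always suffice); the 'none' branch is unreachable
def pvSmlLoop (oldlen : Nat) :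
    Nat → PySem.Dict String Int → PySem.Dict String Int → PySem.Set String →
    PySem.Dict String Int
  | 0, _, new, _ => new
  | fuel + 1, ref, new, td =>
    if new.size < oldlen then
      match pvOneOff ref new with
      | none => new
      | some new' =>
        let td' := PySem.Set.update td new'.keys
        let ref' := td'.foldl (fun r k => if r.contains k then r.erase k else r) ref
        pvSmlLoop oldlen fuel ref' new' td'
    else new

def pvSortMyListPlease (oldlist : PySem.Dict String Int) : PySem.Dict String Int :=
  let ref := oldlist.items.foldl (fun r p => r.setdefault p.1 p.2) PySem.Dict.empty
  pvSmlLoop oldlist.size oldlist.size ref PySem.Dict.empty PySem.Set.empty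

def getPlayerGoalsAtHome (system : List (String × List (String × List (String × String)))) :
    List (String × Int) :=
  (pvSortMyListPlease (pvCountA system)).items

-- ===== PORT B =====
def pvScoredSet : PySem.Set String :=
  PySem.Set.ofList
    ["hg1", "hg2", "hg3", "hg4", "hg5", "hg6", "hg7", "hg8", "hg9", "hg10", "hg11", "hg12"]

def pvCountB (system : List (String × List (String × List (String × String)))) :
    PySem.Dict String Int :=
  system.foldl (fun pdb x =>
    x.2.foldl (fun pdb y =>
      y.2.foldl (fun pdb z =>
        if PySem.Set.contains pvScoredSet z.1 ∧ z.2 ≠ "" then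
          pdb.insert z.2 (pdb.getD z.2 0 + 1)
        else pdb) pdb) pdb) PySem.Dict.empty

def getPlayerGoalsAtHome_alt (system : List (String × List (String × List (String × String)))) :
    List (String × Int) :=
  PySem.List.sorted (pvCountB system).items (fun kv => kv.2) true

-- ===== PRECONDITION & SPEC =====
def Spec_getPlayerGoalsAtHome (system : List (String × List (String × List (String × String)))) (out : List (String × Int)) : Prop := out = getPlayerGoalsAtHome_alt system
instance (system : List (String × List (String × List (String × String)))) (out : List (String × Int)) : Decidable (Spec_getPlayerGoalsAtHome system out) := by unfold Spec_getPlayerGoalsAtHome; infer_instance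

-- ===== CLAIM (what is proved, stated in full; the proofs are below) =====
def Claim_equal_getPlayerGoalsAtHome : Prop := ∀ (system : List (String × List (String × List (String × String)))), Dom_getPlayerGoalsAtHome system → Spec_getPlayerGoalsAtHome system (getPlayerGoalsAtHome system)

-- ===== LEMMAS AND PROOFS =====

-- first element attaining the maximal value, together with the list minus that element
def pvPickMax : List (String × Int) → Option ((String × Int) × List (String × Int))
  | [] => none
  | p :: t =>
    match pvPickMax t with
    | none => some (p, [])
    | some (m, rest) => if p.2 < m.2 then some (m, p :: rest) else some (p, t)

theorem pvPickMax_none_iff (l : List (String × Int)) : pvPickMax l = none ↔ l = [] := by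
  cases l with
  | nil => simp [pvPickMax]
  | cons p t =>
    simp only [pvPickMax]
    cases h : pvPickMax t with
    | none => simp
    | some r => obtain ⟨m, rest⟩ := r; simp only; split <;> simp
theorem pvPickMax_spec (l : List (String × Int)) (m : String × Int)
    (rest : List (String × Int)) (h : pvPickMax l = some (m, rest)) :
    ∃ pre suf, l = pre ++ m :: suf ∧ rest = pre ++ suf ∧
      (∀ q ∈ pre, q.2 < m.2) ∧ (∀ q ∈ suf, q.2 ≤ m.2) := by
  induction l generalizing m rest with
  | nil => simp [pvPickMax] at h
  | cons p t ih =>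
    simp only [pvPickMax] at h
    cases ht : pvPickMax t with
    | none =>
      rw [ht] at h
      simp only [Option.some.injEq, Prod.mk.injEq] at h
      obtain ⟨rfl, rfl⟩ := h
      rw [pvPickMax_none_iff] at ht
      exact ⟨[], [], by simp [ht]⟩
    | some r =>
      obtain ⟨m', rest'⟩ := r
      rw [ht] at h
      simp only at h
      obtain ⟨pre, suf, rfl, rfl, hpre, hsuf⟩ := ih m' rest' ht
      split at h
      · rename_i hlt
        simp only [Option.some.injEq, Prod.mk.injEq] at h
        obtain ⟨rfl, rfl⟩ := h
        refine ⟨p :: pre, suf, rfl, rfl, ?_, hsuf⟩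
        intro q hq
        rcases List.mem_cons.mp hq with rfl | hq
        · exact hlt
        · exact hpre q hq
      · rename_i hge
        rw [not_lt] at hge
        simp only [Option.some.injEq, Prod.mk.injEq] at h
        obtain ⟨rfl, rfl⟩ := h
        refine ⟨[], pre ++ m' :: suf, rfl, rfl, by simp, ?_⟩
        intro q hq
        simp only [List.mem_append, List.mem_cons] at hq
        rcases hq with h1 | rfl | h2
        · exact le_of_lt (lt_of_lt_of_le (hpre q h1) hge)
        · exact hge
        · exact le_trans (hsuf q h2) hge
def pvSortedDesc (l : List (String × Int)) : List (String × Int) :=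
  PySem.List.sorted l (fun p => p.2) true

theorem pvSortedDesc_snoc (l : List (String × Int)) (x : String × Int) :
    pvSortedDesc (l ++ [x]) =
      PySem.List.insertBy (fun a b => decide (b.2 < a.2)) x (pvSortedDesc l) := by
  simp only [pvSortedDesc, PySem.List.sorted_rev_eq_foldl_insertBy, List.foldl_append,
    List.foldl_cons, List.foldl_nil]
theorem pvInsertBy_front {α : Type} (before : α → α → Bool) (x : α) (l : List α)
    (h : ∀ y ∈ l, before x y = true) :
    PySem.List.insertBy before x l = x :: l := by
  cases l with
  | nil => simp [PySem.List.insertBy]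
  | cons y ys => simp [PySem.List.insertBy, h y (by simp)]
theorem pvSortedDesc_cons_max (pre suf : List (String × Int)) (m : String × Int)
    (hpre : ∀ q ∈ pre, q.2 < m.2) (hsuf : ∀ q ∈ suf, q.2 ≤ m.2) :
    pvSortedDesc (pre ++ m :: suf) = m :: pvSortedDesc (pre ++ suf) := by
  induction suf using List.reverseRecOn with
  | nil =>
    have : pre ++ [m] = pre ++ [m] := rfl
    rw [show pre ++ m :: ([] : List (String × Int)) = pre ++ [m] by simp, pvSortedDesc_snoc]
    simp only [List.append_nil]
    apply pvInsertBy_front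
    intro y hy
    have : y ∈ pre := by
      have := (PySem.List.mem_sorted (xs := pre) (key := fun p : String × Int => p.2)
        (rev := true) (x := y)).mp hy
      exact this
    simpa using hpre y this
  | append_singleton s x ih =>
    have hs : ∀ q ∈ s, q.2 ≤ m.2 := fun q hq => hsuf q (by simp [hq])
    have hx : x.2 ≤ m.2 := hsuf x (by simp)
    rw [show pre ++ m :: (s ++ [x]) = (pre ++ m :: s) ++ [x] by simp,
        pvSortedDesc_snoc, ih hs,
        show pre ++ (s ++ [x]) = (pre ++ s) ++ [x] by simp, pvSortedDesc_snoc]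
    simp only [PySem.List.insertBy]
    rw [if_neg (by simpa using not_lt.mpr hx)]
theorem pvOneOffInner_eq (new : PySem.Dict String Int) (m : String × Int)
    (pre suf : List (String × Int)) (hpre : ∀ q ∈ pre, q.2 < m.2) :
    pvOneOffInner m.2 new (pre ++ m :: suf) = some (new.setdefault m.1 m.2) := by
  induction pre with
  | nil => simp [pvOneOffInner]
  | cons q t ih =>
    obtain ⟨a, va⟩ := q
    have hne : m.2 ≠ va := by
      have := hpre (a, va) (by simp); exact ne_of_gt this
    simp only [List.cons_append, pvOneOffInner, if_neg hne]
    exact ih (fun q hq => hpre q (by simp [hq]))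

theorem pvOneOffOuter_eq (ref new : PySem.Dict String Int) (m : String × Int)
    (pre suf : List (String × Int)) (hpre : ∀ q ∈ pre, q.2 < m.2)
    (hmax : PySem.List.max? ref.values (fun v => v) = some m.2) :
    pvOneOffOuter ref new (pre ++ m :: suf) = pvOneOffInner m.2 new ref.items := by
  induction pre with
  | nil =>
    obtain ⟨y, v⟩ := m
    simp only [List.nil_append, pvOneOffOuter, hmax, if_pos trivial]
  | cons q t ih =>
    obtain ⟨a, va⟩ := q
    have hne : some va ≠ some m.2 := by
      have := hpre (a, va) (by simp)
      simpa using ne_of_lt this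
    simp only [List.cons_append, pvOneOffOuter, hmax, if_neg hne]
    exact ih (fun q hq => hpre q (by simp [hq]))

theorem pvOneOff_eq (ref new : PySem.Dict String Int) (m : String × Int)
    (rest : List (String × Int)) (h : pvPickMax ref.items = some (m, rest)) :
    pvOneOff ref new = some (new.setdefault m.1 m.2) := by
  obtain ⟨pre, suf, hl, -, hpre, hsuf⟩ := pvPickMax_spec _ _ _ h
  have hmem : m.2 ∈ ref.values := by
    simp only [PySem.Dict.values, hl]
    exact List.mem_map.mpr ⟨m, by simp, rfl⟩
  have hub : ∀ y ∈ ref.values, y ≤ m.2 := by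
    intro y hy
    simp only [PySem.Dict.values, hl] at hy
    obtain ⟨q, hq, rfl⟩ := List.mem_map.mp hy
    rcases List.mem_append.mp hq with hq | hq
    · exact le_of_lt (hpre q hq)
    · rcases List.mem_cons.mp hq with rfl | hq
      · exact le_refl _
      · exact hsuf q hq
  have hmax : PySem.List.max? ref.values (fun v => v) = some m.2 := by
    cases hv : PySem.List.max? ref.values (fun v => v) with
    | none =>
      rw [PySem.List.max?_eq_none_iff] at hv
      rw [hv] at hmem; simp at hmem
    | some v =>
      have hv1 : v ∈ ref.values := PySem.List.max?_mem hv
      have hv2 : ∀ y ∈ ref.values, y ≤ v := PySem.List.max?_isMax hv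
      have : v = m.2 := le_antisymm (hub v hv1) (hv2 m.2 hmem)
      rw [this]
  unfold pvOneOff
  rw [hl, pvOneOffOuter_eq ref new m pre suf hpre hmax, hl]
  exact pvOneOffInner_eq new m pre suf hpre

theorem pvSmlLoop_eq (fuel oldlen : Nat) (ref new : PySem.Dict String Int)
    (td : PySem.Set String)
    (hnr : ref.keys.Nodup) (hnn : new.keys.Nodup)
    (hdisj : ∀ k ∈ new.keys, ref.contains k = false)
    (htd : td = new.keys)
    (hlen : new.size + ref.size = oldlen)
    (hfuel : ref.size ≤ fuel) :
    (pvSmlLoop oldlen fuel ref new td).items = new.items ++ pvSortedDesc ref.items := by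
  induction fuel generalizing ref new td with
  | zero =>
    have h0 : ref.items = [] := List.length_eq_zero_iff.mp (Nat.le_zero.mp hfuel)
    simp [pvSmlLoop, h0, pvSortedDesc, PySem.List.sorted]
  | succ fuel ih =>
    by_cases hlt : new.size < oldlen
    · have hpos : 0 < ref.size := by omega
      have hne : ref.items ≠ [] := by
        intro h; unfold PySem.Dict.size at hpos; rw [h] at hpos; simp at hpos
      obtain ⟨⟨m, rest⟩, hpm⟩ : ∃ r, pvPickMax ref.items = some r := by
        cases h : pvPickMax ref.items with
        | none => exact absurd ((pvPickMax_none_iff _).mp h) hne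
        | some r => exact ⟨r, rfl⟩
      obtain ⟨pre, suf, hl, hrest, hpre, hsuf⟩ := pvPickMax_spec _ _ _ hpm
      have hOne : pvOneOff ref new = some (new.setdefault m.1 m.2) :=
        pvOneOff_eq ref new m rest hpm
      have hm_mem : m ∈ ref.items := by rw [hl]; simp
      have hmk : m.1 ∈ ref.keys := List.mem_map.mpr ⟨m, hm_mem, rfl⟩
      have hrefc : ref.contains m.1 = true := (PySem.Dict.contains_iff_mem_keys _ _).mpr hmk
      have hm1new : m.1 ∉ new.keys := by
        intro hm1
        have := hdisj m.1 hm1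
        rw [hrefc] at this; cases this
      have hnotnew : new.contains m.1 = false := by
        rw [← Bool.not_eq_true]
        intro hc
        exact hm1new ((PySem.Dict.contains_iff_mem_keys _ _).mp hc)
      have e1 : new.setdefault m.1 m.2 = PySem.Dict.mk (new.items ++ [m]) := by
        unfold PySem.Dict.setdefault
        rw [if_neg (by simp [hnotnew])]
      have ekeys : (PySem.Dict.mk (new.items ++ [m])).keys = new.keys ++ [m.1] := by
        simp [PySem.Dict.keys]
      -- keys of ref, split
      have hkeys : ref.keys = pre.map Prod.fst ++ m.1 :: suf.map Prod.fst := by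
        simp [PySem.Dict.keys, hl]
      have hm1pre : m.1 ∉ pre.map Prod.fst := by
        rw [hkeys] at hnr
        intro h
        exact (List.disjoint_of_nodup_append hnr) h (by simp)
      have hm1suf : m.1 ∉ suf.map Prod.fst := by
        rw [hkeys] at hnr
        have := (List.nodup_append.mp hnr).2.1
        rw [List.nodup_cons] at this
        exact this.1
      -- td' = new.keys ++ [m.1]
      have hnn' : (new.keys ++ [m.1]).Nodup := by
        rw [List.nodup_append]
        refine ⟨hnn, List.nodup_singleton _, ?_⟩
        intro a ha b hb
        rw [List.mem_singleton] at hb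
        subst hb
        intro he
        exact hm1new (he ▸ ha)
      have e2 : PySem.Set.update td (PySem.Dict.mk (new.items ++ [m])).keys
          = new.keys ++ [m.1] := by
        rw [ekeys, PySem.Set.update_eq_append_filter, htd,
            PySem.Set.ofList_eq_self_of_nodup _ hnn']
        rw [List.filter_append]
        have f1 : new.keys.filter (fun y => !(PySem.Set.contains new.keys y)) = [] := by
          apply List.filter_eq_nil_iff.mpr
          intro a ha
          simp [PySem.Set.contains_eq_listContains, ha]
        have f2 : [m.1].filter (fun y => !(PySem.Set.contains new.keys y)) = [m.1] := by
          simp [PySem.Set.contains_eq_listContains, hm1new]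
        rw [f1, f2, List.nil_append]
      -- ref' = ref.erase m.1
      have hskip : ∀ (ks : List String) (r : PySem.Dict String Int),
          (∀ k ∈ ks, r.contains k = false) →
          ks.foldl (fun r k => if r.contains k then r.erase k else r) r = r := by
        intro ks
        induction ks with
        | nil => intro r _; rfl
        | cons k t ihk =>
          intro r hk
          rw [List.foldl_cons, if_neg (by simp [hk k (by simp)])]
          exact ihk r (fun k hk' => hk k (by simp [hk']))
      have e3 : (new.keys ++ [m.1]).foldl
          (fun r k => if r.contains k then r.erase k else r) ref = ref.erase m.1 := by
        rw [List.foldl_append, hskip new.keys ref hdisj, List.foldl_cons, List.foldl_nil,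
            if_pos hrefc]
      have fpre : ∀ p ∈ pre, p.1 ≠ m.1 := by
        intro p hp he
        exact hm1pre (List.mem_map.mpr ⟨p, hp, he⟩)
      have fsuf : ∀ p ∈ suf, p.1 ≠ m.1 := by
        intro p hp he
        exact hm1suf (List.mem_map.mpr ⟨p, hp, he⟩)
      have e4 : (ref.erase m.1).items = pre ++ suf := by
        show ref.items.filter (fun p => !(p.1 == m.1)) = pre ++ suf
        rw [hl, List.filter_append, List.filter_cons]
        have hm : (!(m.1 == m.1)) = false := by simp
        rw [hm]
        simp only [Bool.false_eq_true, if_false]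
        rw [List.filter_eq_self.mpr (fun p hp => by simp [fpre p hp]),
            List.filter_eq_self.mpr (fun p hp => by simp [fsuf p hp])]
      have hnr' : (ref.erase m.1).keys.Nodup := by
        have hk' : (ref.erase m.1).keys = pre.map Prod.fst ++ suf.map Prod.fst := by
          simp [PySem.Dict.keys, e4]
        rw [hk']
        rw [hkeys] at hnr
        exact List.Nodup.sublist
          (List.Sublist.append_left (List.sublist_cons_self _ _) _) hnr
      have hnn2 : (PySem.Dict.mk (new.items ++ [m])).keys.Nodup := by
        rw [ekeys]; exact hnn'
      have hdisj' : ∀ k ∈ (PySem.Dict.mk (new.items ++ [m])).keys,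
          (ref.erase m.1).contains k = false := by
        rw [ekeys]
        intro k hk
        have hc : (ref.erase m.1).contains k = ((pre ++ suf).any (fun p => p.1 == k)) := by
          unfold PySem.Dict.contains
          rw [e4]
        rw [hc]
        rcases List.mem_append.mp hk with hk | hk
        · have hfls : ref.contains k = false := hdisj k hk
          unfold PySem.Dict.contains at hfls
          rw [hl] at hfls
          simp only [List.any_append, List.any_cons, Bool.or_eq_false_iff] at hfls
          simp [List.any_append, hfls.1, hfls.2.2]
        · rw [List.mem_singleton] at hk
          subst hk
          simp only [List.any_append, Bool.or_eq_false_iff]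
          constructor
          · apply List.any_eq_false.mpr
            intro p hp
            simp [fpre p hp]
          · apply List.any_eq_false.mpr
            intro p hp
            simp [fsuf p hp]
      have hsz : ref.size = pre.length + suf.length + 1 := by
        unfold PySem.Dict.size
        rw [hl]
        simp
        omega
      have hsz' : (ref.erase m.1).size = pre.length + suf.length := by
        unfold PySem.Dict.size
        rw [e4]
        simp
      have hszn : (PySem.Dict.mk (new.items ++ [m])).size = new.size + 1 := by
        unfold PySem.Dict.size
        simp
      simp only [pvSmlLoop, hOne, if_pos hlt]
      rw [e1, e2, e3]
      rw [ih _ _ _ hnr' hnn2 hdisj' ekeys.symm (by rw [hszn, hsz']; omega)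
          (by rw [hsz']; omega)]
      rw [e4, hl, pvSortedDesc_cons_max pre suf m hpre hsuf]
      simp
    · have h0 : ref.size = 0 := by omega
      have h0' : ref.items = [] := List.length_eq_zero_iff.mp h0
      simp [pvSmlLoop, if_neg hlt, h0', pvSortedDesc, PySem.List.sorted]

theorem pvCopy_items (l : List (String × Int)) (r : PySem.Dict String Int)
    (hnd : (l.map Prod.fst).Nodup) (hfresh : ∀ p ∈ l, r.contains p.1 = false) :
    l.foldl (fun r p => r.setdefault p.1 p.2) r = PySem.Dict.mk (r.items ++ l) := by
  induction l generalizing r with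
  | nil => simp
  | cons p t ih =>
    have h1 : r.setdefault p.1 p.2 = PySem.Dict.mk (r.items ++ [p]) := by
      unfold PySem.Dict.setdefault
      rw [if_neg (by simp [hfresh p (by simp)])]
    have hfr : ∀ q ∈ t, (PySem.Dict.mk (r.items ++ [p])).contains q.1 = false := by
      intro q hq
      have hq1 : r.contains q.1 = false := hfresh q (by simp [hq])
      have hq2 : q.1 ≠ p.1 := by
        intro he
        have hp : p.1 ∉ t.map Prod.fst := by
          simp only [List.map_cons, List.nodup_cons] at hnd
          exact hnd.1
        exact hp (List.mem_map.mpr ⟨q, hq, he⟩)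
      unfold PySem.Dict.contains at hq1 ⊢
      simp only [List.any_append, List.any_cons, List.any_nil]
      simp [hq1, Ne.symm hq2]
    rw [List.foldl_cons, h1, ih _ (by simpa using hnd.of_cons) hfr]
    rw [List.append_assoc]
    rfl

theorem pvSortMyListPlease_eq (d : PySem.Dict String Int) (hnd : d.keys.Nodup) :
    (pvSortMyListPlease d).items = pvSortedDesc d.items := by
  unfold pvSortMyListPlease
  have hcopy : d.items.foldl (fun r p => r.setdefault p.1 p.2) PySem.Dict.empty = d := by
    rw [pvCopy_items _ _ (by simpa [PySem.Dict.keys] using hnd) (fun p _ => rfl)]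
    rfl
  rw [hcopy]
  rw [pvSmlLoop_eq d.size d.size d PySem.Dict.empty PySem.Set.empty hnd
      List.nodup_nil (by intro k hk; simp [PySem.Dict.keys, PySem.Dict.empty] at hk)
      rfl (by simp [PySem.Dict.size, PySem.Dict.empty]) (le_refl _)]
  rfl

theorem pvFoldlIfOnce {α β : Type} [DecidableEq α] (f : β → β) (a : α) (l : List α)
    (hl : l.Nodup) (d : β) :
    l.foldl (fun d q => if a = q then f d else d) d = if a ∈ l then f d else d := by
  induction l generalizing d with
  | nil => simp
  | cons q t ih =>
    rw [List.nodup_cons] at hl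
    rw [List.foldl_cons]
    by_cases h : a = q
    · subst h
      rw [if_pos rfl, ih hl.2 (f d), if_neg hl.1, if_pos (by simp)]
    · rw [if_neg h, ih hl.2 d]
      simp [h]

theorem pvStep_eq (pdb : PySem.Dict String Int) (z : String × String) :
    pvScoredQ.foldl (fun pdb q =>
        if z.1 = q then
          if z.2 ≠ "" then
            if pdb.contains z.2 = false then pdb.setdefault z.2 1
            else if pdb.contains z.2 then pdb.modify z.2 0 (· + 1)
            else pdb
          else pdb
        else pdb) pdb
    = if PySem.Set.contains pvScoredSet z.1 ∧ z.2 ≠ "" then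
        pdb.insert z.2 (pdb.getD z.2 0 + 1)
      else pdb := by
  rw [pvFoldlIfOnce _ z.1 pvScoredQ (by decide) pdb]
  have hmem : z.1 ∈ pvScoredQ ↔ PySem.Set.contains pvScoredSet z.1 = true := by
    rw [PySem.Set.contains_iff]
    unfold pvScoredSet pvScoredQ
    rw [PySem.Set.ofList_eq_self_of_nodup _ (by decide)]
  by_cases hin : z.1 ∈ pvScoredQ
  · rw [if_pos hin]
    by_cases hz : z.2 = ""
    · rw [if_neg (by simp [hz]), if_neg (by simp [hz])]
    · have hz' : z.2 ≠ "" := hz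
      rw [if_pos hz', if_pos (And.intro (hmem.mp hin) hz')]
      by_cases hc : pdb.contains z.2 = true
      · rw [if_neg (by simp [hc]), if_pos hc]
        rfl
      · have hc' : pdb.contains z.2 = false := by simpa using hc
        rw [if_pos hc']
        unfold PySem.Dict.setdefault PySem.Dict.insert
        rw [if_neg (by simp [hc']), if_neg (by simp [hc']),
            PySem.Dict.getD_of_not_contains pdb 0 hc']
        norm_num
  · rw [if_neg hin, if_neg (fun h => hin (hmem.mpr h.1))]

theorem pvCount_eq (system : List (String × List (String × List (String × String)))) :
    pvCountA system = pvCountB system := by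
  unfold pvCountA pvCountB
  congr 1
  funext pdb x
  congr 1
  funext pdb y
  congr 1
  funext pdb z
  exact pvStep_eq pdb z

theorem pvFoldlPres {β σ : Type} (P : σ → Prop) (f : σ → β → σ)
    (h : ∀ s b, P s → P (f s b)) (l : List β) (s : σ) (hs : P s) : P (l.foldl f s) := by
  induction l generalizing s with
  | nil => exact hs
  | cons b t ih => exact ih (f s b) (h s b hs)

theorem pvCountB_nodup (system : List (String × List (String × List (String × String)))) :
    (pvCountB system).keys.Nodup := by
  unfold pvCountB
  refine pvFoldlPres (fun d : PySem.Dict String Int => d.keys.Nodup) _ ?_ _ _ ?_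
  · intro d x hd
    refine pvFoldlPres (fun d : PySem.Dict String Int => d.keys.Nodup) _ ?_ _ _ ?_
    · intro d y hd
      refine pvFoldlPres (fun d : PySem.Dict String Int => d.keys.Nodup) _ ?_ _ _ ?_
      · intro d z hd
        split
        · exact PySem.Dict.nodup_keys_insert _ _ _ hd
        · exact hd
      · exact hd
    · exact hd
  · simp [PySem.Dict.keys, PySem.Dict.empty]

-- ===== VERDICT (by name: the statement is the Claim_ definition above) =====
theorem getPlayerGoalsAtHome_spec : Claim_equal_getPlayerGoalsAtHome := by
  intro system _
  unfold Spec_getPlayerGoalsAtHome getPlayerGoalsAtHome getPlayerGoalsAtHome_alt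
  rw [pvCount_eq]
  exact pvSortMyListPlease_eq _ (pvCountB_nodup system)
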